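-- pv_equiv track=rewrite | github.com/ocean-uhh/cruiseplan | cruiseplan/utils/input_validation.py | _validate_format_list
-- ===== SOURCE A (Python) =====
-- def _validate_format_list(formats: list[str], valid_formats: list[str]) -> list[str]:
--     """
--     Validate list of output formats.
--
--     Internal utility function for format validation.
--
--     Parameters
--     ----------
--     formats : List[str]
--         List of format strings to validate
--     valid_formats : List[str]
--         List of valid format options
--
--     Returns
--     -------
--     List[str]
--         Validated and normalized format list
--
--     Raises
--     ------
--     ValueError
--         If any format is invalid
--     """
--     if not formats:
--         raise ValueError("At least one format must be specified")
--
--     normalized_formats = []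
--     invalid_formats = []
--
--     for fmt in formats:
--         fmt_clean = fmt.strip().lower()
--         if fmt_clean in valid_formats:
--             normalized_formats.append(fmt_clean)
--         else:
--             invalid_formats.append(fmt)
--
--     if invalid_formats:
--         raise ValueError(
--             f"Invalid formats: {invalid_formats}. " f"Valid options: {valid_formats}"
--         )
--
--     # Remove duplicates while preserving order
--     seen = set()
--     result = []
--     for fmt in normalized_formats:
--         if fmt not in seen:
--             seen.add(fmt)
--             result.append(fmt)
--
--     return result
-- ===== SOURCE B (Python) =====
-- def _validate_format_list(formats: list[str], valid_formats: list[str]) -> list[str]: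
--     """Validate, normalize and dedup a list of format strings in one pass."""
--     if not formats:
--         raise ValueError("At least one format must be specified")
--
--     seen = set()
--     result = []
--     invalid_formats = []
--     for fmt in formats:
--         fmt_clean = fmt.strip().lower()
--         if fmt_clean not in valid_formats:
--             invalid_formats.append(fmt)
--         elif fmt_clean not in seen:
--             seen.add(fmt_clean)
--             result.append(fmt_clean)
--
--     if invalid_formats:
--         raise ValueError(
--             f"Invalid formats: {invalid_formats}. " f"Valid options: {valid_formats}"
--         )
--
--     return result
-- ===== Notes on version B (the rewrite author's own statement) =====
-- stated objective: simpler
-- what changed: Fuses A's three passes (validate+normalize, then dedup with a seen-set) into one loop that validates and dedups simultaneously, dropping the intermediate normalized_formats list.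
-- outside the precondition, e.g. on _validate_format_list([], ['csv']): A raises ValueError, B raises ValueError; on _validate_format_list(['xml'], ['csv']): A raises ValueError, B raises ValueError
import Mathlib
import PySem

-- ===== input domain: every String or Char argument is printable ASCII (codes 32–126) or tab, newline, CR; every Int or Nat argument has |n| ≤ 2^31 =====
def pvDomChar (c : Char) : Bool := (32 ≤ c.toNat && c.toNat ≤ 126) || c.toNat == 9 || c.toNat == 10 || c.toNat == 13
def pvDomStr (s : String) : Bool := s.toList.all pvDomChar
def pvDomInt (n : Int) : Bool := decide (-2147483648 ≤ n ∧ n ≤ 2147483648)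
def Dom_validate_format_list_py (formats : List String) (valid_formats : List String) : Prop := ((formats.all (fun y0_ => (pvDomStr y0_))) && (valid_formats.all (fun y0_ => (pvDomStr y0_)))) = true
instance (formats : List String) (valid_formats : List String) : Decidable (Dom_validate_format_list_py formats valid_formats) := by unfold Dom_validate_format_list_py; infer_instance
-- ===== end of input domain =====

-- B fuses A's validate pass and dedup pass into a single loop (objective: simpler decomposition, same cost).

-- fmt.strip().lower()
def pvClean (f : String) : String := PySem.Str.lower (PySem.Str.strip f)

-- ===== PORT A =====
-- A's dedup step: 'if fmt not in seen: seen.add(fmt); result.append(fmt)'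
def pvDedupStepA (st : PySem.Set String × List String) (fmt : String) : PySem.Set String × List String :=
  if PySem.Set.contains st.1 fmt then st else (PySem.Set.add st.1 fmt, st.2 ++ [fmt])

-- A's first loop step over (normalized_formats, invalid_formats)
def pvSplitStepA (valid_formats : List String) (st : List String × List String) (fmt : String) :
    List String × List String :=
  let fmt_clean := pvClean fmt
  if fmt_clean ∈ valid_formats then (st.1 ++ [fmt_clean], st.2) else (st.1, st.2 ++ [fmt])

def validate_format_list_py (formats : List String) (valid_formats : List String) : List String :=
  if formats = [] then []  -- Python: raise ValueError (excluded by Pre_)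
  else
    let p := formats.foldl (pvSplitStepA valid_formats) ([], [])
    if p.2 ≠ [] then []  -- Python: raise ValueError (excluded by Pre_)
    else (p.1.foldl pvDedupStepA ([], [])).2

-- ===== PORT B =====
-- B's single loop step over (seen, result, invalid_formats)
def pvStepB (valid_formats : List String) (st : PySem.Set String × List String × List String)
    (fmt : String) : PySem.Set String × List String × List String :=
  let fmt_clean := pvClean fmt
  if fmt_clean ∉ valid_formats then (st.1, st.2.1, st.2.2 ++ [fmt])
  else if PySem.Set.contains st.1 fmt_clean then st
  else (PySem.Set.add st.1 fmt_clean, st.2.1 ++ [fmt_clean], st.2.2)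

def validate_format_list_py_alt (formats : List String) (valid_formats : List String) : List String :=
  if formats = [] then []  -- Python: raise ValueError (excluded by Pre_)
  else
    let st := formats.foldl (pvStepB valid_formats) ([], [], [])
    if st.2.2 ≠ [] then []  -- Python: raise ValueError (excluded by Pre_)
    else st.2.1

-- ===== PRECONDITION & SPEC =====
-- A raises ValueError on an empty formats list and whenever some format, stripped and lowercased,
-- is not among valid_formats; exactly those inputs are excluded.
def Pre_validate_format_list_py (formats : List String) (valid_formats : List String) : Prop :=
  formats ≠ [] ∧ ∀ fmt ∈ formats, pvClean fmt ∈ valid_formats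
instance (formats : List String) (valid_formats : List String) : Decidable (Pre_validate_format_list_py formats valid_formats) := by unfold Pre_validate_format_list_py; infer_instance

def pvWitness_validate_format_list_py : List String × List String := ([" CSV ", "csv", "Json"], ["csv", "json"])

def Spec_validate_format_list_py (formats : List String) (valid_formats : List String) (out : List String) : Prop := out = validate_format_list_py_alt formats valid_formats
instance (formats : List String) (valid_formats : List String) (out : List String) : Decidable (Spec_validate_format_list_py formats valid_formats out) := by unfold Spec_validate_format_list_py; infer_instance

-- ===== CLAIM (what is proved, stated in full; the proofs are below) =====
def Claim_equal_validate_format_list_py : Prop := ∀ (formats : List String) (valid_formats : List String), Dom_validate_format_list_py formats valid_formats → Pre_validate_format_list_py formats valid_formats → Spec_validate_format_list_py formats valid_formats (validate_format_list_py formats valid_formats)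

-- ===== LEMMAS AND PROOFS =====

-- Under Pre_, A's first loop just maps pvClean and adds nothing to invalid_formats.
theorem pvFoldA_valid (v : List String) :
    ∀ (l acc inv : List String), (∀ f ∈ l, pvClean f ∈ v) →
      l.foldl (pvSplitStepA v) (acc, inv) = (acc ++ l.map pvClean, inv) := by
  intro l
  induction l with
  | nil => simp
  | cons x xs ih =>
    intro acc inv h
    have hx : pvClean x ∈ v := h x (by simp)
    simp only [List.foldl_cons, pvSplitStepA, if_pos hx]
    rw [ih (acc ++ [pvClean x]) inv (fun f hf => h f (by simp [hf]))]
    simp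

-- Under Pre_, B's fused loop computes A's dedup fold on the cleaned list, with empty invalid.
theorem pvFoldB_valid (v : List String) :
    ∀ (l : List String) (seen : PySem.Set String) (res inv : List String),
      (∀ f ∈ l, pvClean f ∈ v) →
      l.foldl (pvStepB v) (seen, res, inv) =
        (((l.map pvClean).foldl pvDedupStepA (seen, res)).1,
         ((l.map pvClean).foldl pvDedupStepA (seen, res)).2, inv) := by
  intro l
  induction l with
  | nil => simp
  | cons x xs ih =>
    intro seen res inv h
    have hx : pvClean x ∈ v := h x (by simp)
    have htl : ∀ f ∈ xs, pvClean f ∈ v := fun f hf => h f (by simp [hf])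
    simp only [List.foldl_cons, List.map_cons, pvStepB, pvDedupStepA]
    rw [if_neg (show ¬ pvClean x ∉ v by simp [hx])]
    by_cases hc : PySem.Set.contains seen (pvClean x)
    · rw [if_pos hc, if_pos hc]
      exact ih seen res inv htl
    · rw [if_neg hc, if_neg hc]
      exact ih (PySem.Set.add seen (pvClean x)) (res ++ [pvClean x]) inv htl

-- ===== VERDICT (by name: the statement is the Claim_ definition above) =====
theorem validate_format_list_py_spec : Claim_equal_validate_format_list_py := by
  intro formats valid_formats _ hpre
  obtain ⟨hne, hval⟩ := hpre
  unfold Spec_validate_format_list_py validate_format_list_py validate_format_list_py_alt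
  rw [if_neg hne, if_neg hne]
  simp only [pvFoldA_valid valid_formats formats [] [] hval,
    pvFoldB_valid valid_formats formats [] [] [] hval]
  simp
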